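-- pv_equiv track=rewrite | github.com/ansible-collections/ibm_zos_cics | plugins/module_utils/_global_catalog.py | _get_catalog_records
-- ===== SOURCE A (Python) =====
-- def _get_value_from_line(line):  # type: (list[str]) -> str | None
--     val = None
--     if len(line) == 1:
--         val = line[0].split(":")[1]
--     return val
--
-- def _get_filtered_list(elements, target):  # type: (list[str],str) -> list[str]
--     return list(filter(lambda x: target in x, elements))
--
-- def _get_catalog_records(stdout):  # type: (str) -> tuple[str | None, str | None]
--     elements = ['{0}'.format(element.replace(" ", "").upper())
--                 for element in stdout.split("\n")]
--
--     autostart_filtered = _get_filtered_list(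
--         elements, "AUTO-STARTOVERRIDE:")
--     nextstart_filtered = _get_filtered_list(elements, "NEXTSTARTTYPE:")
--
--     autostart_override = _get_value_from_line(
--         autostart_filtered)
--     nextstart = _get_value_from_line(nextstart_filtered)
--
--     return (autostart_override, nextstart)
-- ===== SOURCE B (Python) =====
-- def _get_catalog_records(stdout):  # type: (str) -> tuple[str | None, str | None]
--     auto_count = 0
--     next_count = 0
--     auto_val = None
--     next_val = None
--     for line in stdout.split("\n"):
--         norm = line.replace(" ", "").upper()
--         if "AUTO-STARTOVERRIDE:" in norm:
--             auto_count += 1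
--             if auto_count == 1:
--                 auto_val = norm.split(":")[1]
--         if "NEXTSTARTTYPE:" in norm:
--             next_count += 1
--             if next_count == 1:
--                 next_val = norm.split(":")[1]
--     return (auto_val if auto_count == 1 else None,
--             next_val if next_count == 1 else None)
-- ===== Notes on version B (the rewrite author's own statement) =====
-- stated objective: alternative
-- what changed: A builds the normalized element list and then runs two separate full filter passes plus a length-1 value extraction; B makes a single pass over the split lines, maintaining per-target match counts and the first matching line's second colon-separated field, returning each value only when its count is exactly 1.
import Mathlib
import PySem

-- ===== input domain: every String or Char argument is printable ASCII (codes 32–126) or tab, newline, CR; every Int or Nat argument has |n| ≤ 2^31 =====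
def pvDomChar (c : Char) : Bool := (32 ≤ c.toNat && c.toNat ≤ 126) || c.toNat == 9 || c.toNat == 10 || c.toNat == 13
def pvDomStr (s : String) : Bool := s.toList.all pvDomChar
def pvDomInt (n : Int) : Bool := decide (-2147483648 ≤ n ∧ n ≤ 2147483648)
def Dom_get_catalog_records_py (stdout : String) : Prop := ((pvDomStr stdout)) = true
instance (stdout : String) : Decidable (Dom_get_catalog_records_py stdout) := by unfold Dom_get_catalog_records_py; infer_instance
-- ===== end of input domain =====

-- B replaces A's build-all-elements-then-two-full-filter-passes structure by a single
-- pass over the lines maintaining per-target match counts and first-match values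
-- (objective: alternative decomposition, one pass instead of three).


-- shared by both ports: Python's element.replace(" ", "").upper()
def pvNorm (e : String) : String := PySem.Str.upper (PySem.Str.replace e " " "")

-- ===== PORT A =====
-- _get_value_from_line: line[0].split(":")[1] via pyGet? (none = IndexError; unreachable
-- here since every filtered line contains ":")
def pvGetValueFromLine (line : List String) : Option String :=
  if line.length = 1 then
    match PySem.List.pyGet? line 0 with
    | some s => PySem.List.pyGet? ((PySem.Str.split? s ":").getD []) 1
    | none => none
  else none

def pvGetFilteredList (elements : List String) (target : String) : List String :=
  elements.filter (fun x => PySem.Str.isIn target x)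

def get_catalog_records_py (stdout : String) : Option String × Option String :=
  let elements := ((PySem.Str.split? stdout "\n").getD []).map (fun e => pvNorm e)
  let autostart_filtered := pvGetFilteredList elements "AUTO-STARTOVERRIDE:"
  let nextstart_filtered := pvGetFilteredList elements "NEXTSTARTTYPE:"
  (pvGetValueFromLine autostart_filtered, pvGetValueFromLine nextstart_filtered)

-- ===== PORT B =====
-- norm.split(":")[1] of Source B, via pyGet? (none = IndexError; unreachable: norm contains ":")
def pvValOf (norm : String) : Option String :=
  PySem.List.pyGet? ((PySem.Str.split? norm ":").getD []) 1

-- loop body of Source B: state = (auto_count, auto_val, next_count, next_val)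
def pvStep : Nat × Option String × Nat × Option String → String →
    Nat × Option String × Nat × Option String
  | (ca, va, cn, vn), line =>
    let norm := pvNorm line
    let ca' := if PySem.Str.isIn "AUTO-STARTOVERRIDE:" norm then ca + 1 else ca
    let va' := if PySem.Str.isIn "AUTO-STARTOVERRIDE:" norm ∧ ca' = 1 then pvValOf norm else va
    let cn' := if PySem.Str.isIn "NEXTSTARTTYPE:" norm then cn + 1 else cn
    let vn' := if PySem.Str.isIn "NEXTSTARTTYPE:" norm ∧ cn' = 1 then pvValOf norm else vn
    (ca', va', cn', vn')

def get_catalog_records_py_alt (stdout : String) : Option String × Option String :=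
  let st := ((PySem.Str.split? stdout "\n").getD []).foldl pvStep (0, none, 0, none)
  ((if st.1 = 1 then st.2.1 else none), (if st.2.2.1 = 1 then st.2.2.2 else none))

-- ===== PRECONDITION & SPEC =====
def Spec_get_catalog_records_py (stdout : String) (out : Option String × Option String) : Prop := out = get_catalog_records_py_alt stdout
instance (stdout : String) (out : Option String × Option String) : Decidable (Spec_get_catalog_records_py stdout out) := by unfold Spec_get_catalog_records_py; infer_instance

-- ===== CLAIM (what is proved, stated in full; the proofs are below) =====
def Claim_equal_get_catalog_records_py : Prop := ∀ (stdout : String), Dom_get_catalog_records_py stdout → Spec_get_catalog_records_py stdout (get_catalog_records_py stdout)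

-- ===== LEMMAS AND PROOFS =====

def pvFilt (target : String) (ls : List String) : List String :=
  (ls.map pvNorm).filter (fun x => PySem.Str.isIn target x)

theorem pvFilt_cons (target h : String) (t : List String) :
    pvFilt target (h :: t) =
      if PySem.Str.isIn target (pvNorm h) = true then pvNorm h :: pvFilt target t
      else pvFilt target t := by
  simp [pvFilt, List.filter_cons]

-- abstract forms of the inductive step (both targets match / only first / only second)
theorem pvAbs_tt (f : String → Option String) (x : String) (FA FN : List String)
    (ca cn : Nat) (va vn : Option String) :
    (ca + 1 + FA.length,
     (if ca + 1 = 0 then FA.head?.elim (if ca + 1 = 1 then f x else va) f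
      else (if ca + 1 = 1 then f x else va)),
     cn + 1 + FN.length,
     (if cn + 1 = 0 then FN.head?.elim (if cn + 1 = 1 then f x else vn) f
      else (if cn + 1 = 1 then f x else vn)))
    = (ca + (x :: FA).length,
       (if ca = 0 then ((x :: FA).head?.elim va f) else va),
       cn + (x :: FN).length,
       (if cn = 0 then ((x :: FN).head?.elim vn f) else vn)) := by
  simp only [Prod.mk.injEq, List.length_cons, List.head?_cons, Option.elim_some]
  refine ⟨by omega, ?_, by omega, ?_⟩ <;>
    (split_ifs <;> first | rfl | omega | (exfalso; omega))

theorem pvAbs_tf (f : String → Option String) (x : String) (FA FN : List String)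
    (ca cn : Nat) (va vn : Option String) :
    (ca + 1 + FA.length,
     (if ca + 1 = 0 then FA.head?.elim (if ca + 1 = 1 then f x else va) f
      else (if ca + 1 = 1 then f x else va)),
     cn + FN.length,
     (if cn = 0 then FN.head?.elim vn f else vn))
    = (ca + (x :: FA).length,
       (if ca = 0 then ((x :: FA).head?.elim va f) else va),
       cn + FN.length,
       (if cn = 0 then (FN.head?.elim vn f) else vn)) := by
  simp only [Prod.mk.injEq, List.length_cons, List.head?_cons, Option.elim_some,
    and_true]
  refine ⟨by omega, ?_⟩
  split_ifs <;> first | rfl | omega | (exfalso; omega)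

theorem pvAbs_ft (f : String → Option String) (x : String) (FA FN : List String)
    (ca cn : Nat) (va vn : Option String) :
    (ca + FA.length,
     (if ca = 0 then FA.head?.elim va f else va),
     cn + 1 + FN.length,
     (if cn + 1 = 0 then FN.head?.elim (if cn + 1 = 1 then f x else vn) f
      else (if cn + 1 = 1 then f x else vn)))
    = (ca + FA.length,
       (if ca = 0 then (FA.head?.elim va f) else va),
       cn + (x :: FN).length,
       (if cn = 0 then ((x :: FN).head?.elim vn f) else vn)) := by
  simp only [Prod.mk.injEq, List.length_cons, List.head?_cons, Option.elim_some,
    true_and]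
  refine ⟨by omega, ?_⟩
  split_ifs <;> first | rfl | omega | (exfalso; omega)

set_option maxHeartbeats 1000000 in
-- invariant of B's single pass
theorem pvFold_inv (ls : List String) (ca : Nat) (va : Option String)
    (cn : Nat) (vn : Option String) :
    ls.foldl pvStep (ca, va, cn, vn) =
      (ca + (pvFilt "AUTO-STARTOVERRIDE:" ls).length,
       (if ca = 0 then ((pvFilt "AUTO-STARTOVERRIDE:" ls).head?.elim va pvValOf) else va),
       cn + (pvFilt "NEXTSTARTTYPE:" ls).length,
       (if cn = 0 then ((pvFilt "NEXTSTARTTYPE:" ls).head?.elim vn pvValOf) else vn)) := by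
  induction ls generalizing ca va cn vn with
  | nil => simp [pvFilt]
  | cons h t ih =>
    simp only [List.foldl_cons]
    by_cases hA : PySem.Str.isIn "AUTO-STARTOVERRIDE:" (pvNorm h) = true <;>
    by_cases hN : PySem.Str.isIn "NEXTSTARTTYPE:" (pvNorm h) = true
    · rw [show pvStep (ca, va, cn, vn) h =
          (ca + 1, (if ca + 1 = 1 then pvValOf (pvNorm h) else va),
           cn + 1, (if cn + 1 = 1 then pvValOf (pvNorm h) else vn)) by
            simp only [pvStep, hA, hN, true_and, if_true]]
      rw [ih, pvFilt_cons, pvFilt_cons, if_pos hA, if_pos hN]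
      exact pvAbs_tt pvValOf (pvNorm h) _ _ ca cn va vn
    · rw [show pvStep (ca, va, cn, vn) h =
          (ca + 1, (if ca + 1 = 1 then pvValOf (pvNorm h) else va), cn, vn) by
            simp only [pvStep, hA, hN, Bool.false_eq_true, true_and, false_and,
              if_true, if_false]]
      rw [ih, pvFilt_cons, pvFilt_cons, if_pos hA, if_neg hN]
      exact pvAbs_tf pvValOf (pvNorm h) _ _ ca cn va vn
    · rw [show pvStep (ca, va, cn, vn) h =
          (ca, va, cn + 1, (if cn + 1 = 1 then pvValOf (pvNorm h) else vn)) by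
            simp only [pvStep, hA, hN, Bool.false_eq_true, true_and, false_and,
              if_true, if_false]]
      rw [ih, pvFilt_cons, pvFilt_cons, if_neg hA, if_pos hN]
      exact pvAbs_ft pvValOf (pvNorm h) _ _ ca cn va vn
    · rw [show pvStep (ca, va, cn, vn) h = (ca, va, cn, vn) by
            simp only [pvStep, hA, hN, Bool.false_eq_true, false_and, if_false]]
      rw [ih, pvFilt_cons, pvFilt_cons, if_neg hA, if_neg hN]

theorem pv_side (f : List String) :
    (if f.length = 1 then (f.head?.elim none pvValOf) else none) = pvGetValueFromLine f := by
  match f with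
  | [] => rfl
  | [x] => rfl
  | x :: y :: t => rfl

-- ===== VERDICT (by name: the statement is the Claim_ definition above) =====
theorem get_catalog_records_py_spec : Claim_equal_get_catalog_records_py := by
  intro stdout _
  unfold Spec_get_catalog_records_py get_catalog_records_py get_catalog_records_py_alt
  rw [pvFold_inv]
  simp only [Nat.zero_add, reduceIte]
  rw [pv_side, pv_side]
  rfl
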